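-- pv_equiv track=rewrite | github.com/AlfredKai/KaiCodingNotes | LeetCode/Contests/189/1.py | busyStudent
-- ===== SOURCE A (Python) =====
-- from typing import List
--
-- def busyStudent(startTime: List[int], endTime: List[int], queryTime: int) -> int:
--     st = []
--     for i, s in enumerate(startTime):
--         if s <= queryTime:
--             st.append(i)
--     r = 0
--     for i in st:
--         if endTime[i] >= queryTime:
--             r += 1
--     return r
-- ===== SOURCE B (Python) =====
-- def busyStudent(startTime, endTime, queryTime):
--     return sum(s <= queryTime <= e for s, e in zip(startTime, endTime))
-- ===== Notes on version B (the rewrite author's own statement) =====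
-- stated objective: simpler
-- what changed: Replaces A's two-pass structure (build a list of qualifying indices, then re-scan it indexing endTime) by a single pass over zip(startTime, endTime) summing booleans, with no intermediate list and no indexing.
import Mathlib
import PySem

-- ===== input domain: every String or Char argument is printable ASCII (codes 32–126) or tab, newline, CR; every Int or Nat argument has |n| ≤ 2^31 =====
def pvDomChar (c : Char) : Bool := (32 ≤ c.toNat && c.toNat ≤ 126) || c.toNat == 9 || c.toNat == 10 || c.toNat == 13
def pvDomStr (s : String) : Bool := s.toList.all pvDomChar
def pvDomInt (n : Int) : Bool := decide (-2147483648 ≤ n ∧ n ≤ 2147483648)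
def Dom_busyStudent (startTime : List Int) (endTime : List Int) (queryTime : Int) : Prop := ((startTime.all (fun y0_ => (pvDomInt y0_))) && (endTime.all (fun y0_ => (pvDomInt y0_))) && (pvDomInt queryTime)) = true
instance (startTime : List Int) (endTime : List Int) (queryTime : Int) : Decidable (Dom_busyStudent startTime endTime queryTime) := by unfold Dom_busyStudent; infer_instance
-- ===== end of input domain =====

-- B replaces A's two passes (collect qualifying indices, then re-scan indexing endTime)
-- by one pass over zip(startTime, endTime) summing booleans; objective: simpler.

-- ===== PORT A =====
-- st = [i for the loop appending indices with startTime[i] <= queryTime];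
-- then count i in st with endTime[i] >= queryTime.  endTime[i] is pyGetD (the default
-- is never reached under Pre_, which excludes exactly the IndexError inputs).
def busyStudent (startTime : List Int) (endTime : List Int) (queryTime : Int) : Int :=
  let st : List Int := (PySem.List.enumerate startTime).foldl
    (fun acc p => if p.2 ≤ queryTime then acc ++ [p.1] else acc) []
  st.foldl (fun r i => if PySem.List.pyGetD endTime i 0 ≥ queryTime then r + 1 else r) 0

-- ===== PORT B =====
-- sum(s <= queryTime <= e for s, e in zip(startTime, endTime))
def busyStudent_alt (startTime : List Int) (endTime : List Int) (queryTime : Int) : Int :=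
  ((startTime.zip endTime).map
    (fun p => if p.1 ≤ queryTime ∧ queryTime ≤ p.2 then (1 : Int) else 0)).sum

-- ===== PRECONDITION & SPEC =====
-- Pre_ excludes exactly the inputs on which A raises IndexError: a qualifying start
-- index that lies beyond the end of endTime.
def Pre_busyStudent (startTime : List Int) (endTime : List Int) (queryTime : Int) : Prop :=
  ∀ (k : Nat) (hk : k < startTime.length), startTime[k] ≤ queryTime → k < endTime.length

instance (startTime : List Int) (endTime : List Int) (queryTime : Int) : Decidable (Pre_busyStudent startTime endTime queryTime) := by unfold Pre_busyStudent; infer_instance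

def pvWitness_busyStudent : List Int × List Int × Int := ([1, 5, 2], [3, 7, 2], 4)

def Spec_busyStudent (startTime : List Int) (endTime : List Int) (queryTime : Int) (out : Int) : Prop := out = busyStudent_alt startTime endTime queryTime
instance (startTime : List Int) (endTime : List Int) (queryTime : Int) (out : Int) : Decidable (Spec_busyStudent startTime endTime queryTime out) := by unfold Spec_busyStudent; infer_instance

-- ===== CLAIM (what is proved, stated in full; the proofs are below) =====
def Claim_equal_busyStudent : Prop := ∀ (startTime : List Int) (endTime : List Int) (queryTime : Int), Dom_busyStudent startTime endTime queryTime → Pre_busyStudent startTime endTime queryTime → Spec_busyStudent startTime endTime queryTime (busyStudent startTime endTime queryTime)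

-- ===== LEMMAS AND PROOFS =====

theorem decide_and_eq (p q : Prop) [Decidable p] [Decidable q] :
    decide (p ∧ q) = (decide p && decide q) := by
  by_cases hp : p <;> by_cases hq : q <;> simp [hp, hq]

-- pyGetD steps through a cons for a nonnegative index
theorem pyGetD_cons_succ (b : Int) (l : List Int) (m : Int) (hm : 0 ≤ m) (d : Int) :
    PySem.List.pyGetD (b :: l) (m + 1) d = PySem.List.pyGetD l m d := by
  obtain ⟨n, rfl⟩ := Int.eq_ofNat_of_zero_le hm
  have : ((n : Int) + 1) = ((n + 1 : Nat) : Int) := by push_cast; ring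
  rw [this, PySem.List.pyGetD_natCast, PySem.List.pyGetD_natCast]
  simp [List.getD]

-- shifting the enumerate start by one matches dropping the head of endTime
theorem count_shift (s : List Int) (b : Int) (e : List Int) (q : Int) :
    ∀ (m : Int), 0 ≤ m →
    ((PySem.List.enumerate s (m + 1)).countP
      (fun p => decide (p.2 ≤ q) && decide (q ≤ PySem.List.pyGetD (b :: e) p.1 0))) =
    ((PySem.List.enumerate s m).countP
      (fun p => decide (p.2 ≤ q) && decide (q ≤ PySem.List.pyGetD e p.1 0))) := by
  induction s with
  | nil => intro m hm; simp [PySem.List.enumerate]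
  | cons x xs ih =>
    intro m hm
    rw [PySem.List.enumerate_cons, PySem.List.enumerate_cons, List.countP_cons, List.countP_cons]
    rw [pyGetD_cons_succ b e m hm, ih (m + 1) (by omega)]

-- the core: A's index-based count equals B's zip-based count, under Pre_
theorem count_main (q : Int) : ∀ (s e : List Int),
    (∀ (k : Nat) (hk : k < s.length), s[k] ≤ q → k < e.length) →
    ((PySem.List.enumerate s 0).countP
      (fun p => decide (p.2 ≤ q) && decide (q ≤ PySem.List.pyGetD e p.1 0))) =
    ((s.zip e).countP (fun p => decide (p.1 ≤ q ∧ q ≤ p.2))) := by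
  intro s
  induction s with
  | nil => intro e _; simp [PySem.List.enumerate]
  | cons a s' ih =>
    intro e h
    cases e with
    | nil =>
      simp only [List.zip_nil_right, List.countP_nil]
      apply List.countP_eq_zero.mpr
      intro p hp
      obtain ⟨k, hk, rfl⟩ := (PySem.List.mem_enumerate_iff _ _ _).mp hp
      have := h k hk
      simp only [List.length_nil] at this
      simp only [Bool.and_eq_true, decide_eq_true_eq]
      rintro ⟨h1, -⟩
      omega
    | cons b e' =>
      rw [PySem.List.enumerate_cons, List.countP_cons, List.zip_cons_cons, List.countP_cons]
      have h0 : PySem.List.pyGetD (b :: e') (0 : Int) 0 = b := by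
        exact PySem.List.pyGetD_natCast (b :: e') 0 0
      rw [count_shift s' b e' q 0 le_rfl, ih e' ?_]
      · congr 1
        simp only [h0, decide_and_eq]
      · intro k hk hle
        have := h (k + 1) (by simpa using Nat.succ_lt_succ hk) (by simpa using hle)
        simpa using this

-- a sum of 0/1 indicators is a count
theorem sum_ite_eq_countP (q : Int) (l : List (Int × Int)) :
    ((l.map (fun p => if p.1 ≤ q ∧ q ≤ p.2 then (1 : Int) else 0)).sum) =
    ((l.countP (fun p => decide (p.1 ≤ q ∧ q ≤ p.2))) : Int) := by
  induction l with
  | nil => simp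
  | cons x xs ih =>
    simp only [List.map_cons, List.sum_cons, List.countP_cons, ih]
    by_cases hx : x.1 ≤ q ∧ q ≤ x.2
    · simp [hx]
      ring
    · simp [hx]

-- ===== VERDICT (by name: the statement is the Claim_ definition above) =====
theorem busyStudent_spec : Claim_equal_busyStudent := by
  intro s e q _ hpre
  unfold Spec_busyStudent busyStudent busyStudent_alt
  have hA : (PySem.List.enumerate s).foldl
      (fun acc p => if p.2 ≤ q then acc ++ [p.1] else acc) [] =
      ((PySem.List.enumerate s).filter (fun p => decide (p.2 ≤ q))).map Prod.fst := by
    simpa using PySem.List.foldl_append_if (fun p : Int × Int => decide (p.2 ≤ q))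
      Prod.fst (PySem.List.enumerate s) []
  rw [hA]
  rw [show (fun (r i : Int) => if PySem.List.pyGetD e i 0 ≥ q then r + 1 else r) =
      (fun r i => if (fun i => decide (q ≤ PySem.List.pyGetD e i 0)) i = true then r + 1 else r)
      from by funext r i; simp [ge_iff_le]]
  rw [PySem.List.foldl_count_if (fun i => decide (q ≤ PySem.List.pyGetD e i 0))
      (((PySem.List.enumerate s).filter (fun p => decide (p.2 ≤ q))).map Prod.fst) 0]
  rw [List.countP_map, List.countP_filter]
  rw [sum_ite_eq_countP]
  rw [← count_main q s e hpre]
  norm_num [Function.comp]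
  apply List.countP_congr
  intro p _
  rw [Bool.and_comm]
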